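-- pv_equiv track=rewrite | github.com/Jiseoup/python-coding-test | High-Score-Kit/Exhaustive-Search/exam.py | solution
-- ===== SOURCE A (Python) =====
-- def solution(answers):
--     """ My First Solution """
--     # Define students and their answer patterns.
--     students = {
--         1: [1, 2, 3, 4, 5],
--         2: [2, 1, 2, 3, 2, 4, 2, 5],
--         3: [3, 3, 1, 1, 2, 2, 4, 4, 5, 5]
--     }
--
--     # Compare answers and count their scores.
--     for _id, student in students.items():
--         count = 0
--         for idx, answer in enumerate(answers):
--             student_answer = student[idx % len(student)]
--             if answer == student_answer:
--                 count += 1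
--         students[_id] = count
--
--     answer = []
--     max_score = max(students.values())
--     # If student's score equals to max score, append student index to the list.
--     for _id, score in students.items():
--         if score == max_score:
--             answer.append(_id)
--
--     return answer
-- ===== SOURCE B (Python) =====
-- def solution(answers):
--     """Single pass over answers maintaining one counter per student."""
--     p1 = [1, 2, 3, 4, 5]
--     p2 = [2, 1, 2, 3, 2, 4, 2, 5]
--     p3 = [3, 3, 1, 1, 2, 2, 4, 4, 5, 5]
--     c1 = c2 = c3 = 0
--     for idx, answer in enumerate(answers):
--         if answer == p1[idx % 5]:
--             c1 += 1
--         if answer == p2[idx % 8]: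
--             c2 += 1
--         if answer == p3[idx % 10]:
--             c3 += 1
--     m = max(c1, c2, c3)
--     result = []
--     if c1 == m:
--         result.append(1)
--     if c2 == m:
--         result.append(2)
--     if c3 == m:
--         result.append(3)
--     return result
-- ===== Notes on version B (the rewrite author's own statement) =====
-- stated objective: alternative
-- what changed: A scans the whole answers list once per student (three full passes over a rebuilt dict, then a dict-values max and a dict scan); B makes a single pass over answers maintaining three counters simultaneously, then takes the max of the three counters directly and appends ids 1..3 in order.
import Mathlib
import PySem

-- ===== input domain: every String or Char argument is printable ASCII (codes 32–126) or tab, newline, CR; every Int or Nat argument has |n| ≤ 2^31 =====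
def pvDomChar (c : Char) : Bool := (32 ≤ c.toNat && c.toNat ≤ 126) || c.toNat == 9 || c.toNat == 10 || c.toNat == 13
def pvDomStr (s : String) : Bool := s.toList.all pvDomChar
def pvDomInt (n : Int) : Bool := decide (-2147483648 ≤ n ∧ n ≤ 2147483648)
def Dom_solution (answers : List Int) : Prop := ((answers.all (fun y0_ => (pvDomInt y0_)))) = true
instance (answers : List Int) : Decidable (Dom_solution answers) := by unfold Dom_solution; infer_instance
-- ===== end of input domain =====

-- B replaces A's three full scans of answers (one per student) by a single pass
-- maintaining three counters; same return value, objective: alternative decomposition.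

-- ===== PORT A =====
-- A's inner loop for one student: count = 0; for idx, answer in enumerate(answers):
--   if answer == student[idx % len(student)]: count += 1
-- student[idx % len(student)] never raises (0 ≤ idx % len < len), so .getD 0 is exact.
def pvCountA (student : List Int) (answers : List Int) : Int :=
  (PySem.List.enumerate answers 0).foldl
    (fun count p =>
      if p.2 = (PySem.List.pyGet? student (PySem.Int.mod p.1 student.length)).getD 0
      then count + 1 else count) 0

def solution (answers : List Int) : List Int :=
  -- students dict, its values overwritten by counts in the loop; here the three
  -- counts are computed in the same dict order 1, 2, 3.
  let students : List (Int × Int) :=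
    [(1, pvCountA [1, 2, 3, 4, 5] answers),
     (2, pvCountA [2, 1, 2, 3, 2, 4, 2, 5] answers),
     (3, pvCountA [3, 3, 1, 1, 2, 2, 4, 4, 5, 5] answers)]
  -- max(students.values()) — the list is nonempty, so .getD 0 is exact
  let max_score : Int := (PySem.List.max? (students.map (·.2)) (fun x => x)).getD 0
  students.foldl (fun answer q => if q.2 = max_score then answer ++ [q.1] else answer) []

-- ===== PORT B =====
-- one pass over enumerate(answers) with a triple of counters (c1, c2, c3)
def pvStepB (s : Int × Int × Int) (p : Int × Int) : Int × Int × Int :=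
  let s := if p.2 = (PySem.List.pyGet? [1, 2, 3, 4, 5] (PySem.Int.mod p.1 5)).getD 0
           then (s.1 + 1, s.2.1, s.2.2) else s
  let s := if p.2 = (PySem.List.pyGet? [2, 1, 2, 3, 2, 4, 2, 5] (PySem.Int.mod p.1 8)).getD 0
           then (s.1, s.2.1 + 1, s.2.2) else s
  let s := if p.2 = (PySem.List.pyGet? [3, 3, 1, 1, 2, 2, 4, 4, 5, 5] (PySem.Int.mod p.1 10)).getD 0
           then (s.1, s.2.1, s.2.2 + 1) else s
  s

def solution_alt (answers : List Int) : List Int :=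
  let s := (PySem.List.enumerate answers 0).foldl pvStepB (0, 0, 0)
  let m : Int := max s.1 (max s.2.1 s.2.2)
  (if s.1 = m then [1] else []) ++ (if s.2.1 = m then [2] else []) ++
    (if s.2.2 = m then [3] else [])

-- ===== PRECONDITION & SPEC =====
def Spec_solution (answers : List Int) (out : List Int) : Prop := out = solution_alt answers
instance (answers : List Int) (out : List Int) : Decidable (Spec_solution answers out) := by unfold Spec_solution; infer_instance

-- ===== CLAIM (what is proved, stated in full; the proofs are below) =====
def Claim_equal_solution : Prop := ∀ (answers : List Int), Dom_solution answers → Spec_solution answers (solution answers)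

-- ===== LEMMAS AND PROOFS =====

-- B's triple fold computes the three per-student counts of A, componentwise.
theorem pvFold_triple (l : List (Int × Int)) (a b c : Int) :
    l.foldl pvStepB (a, b, c) =
      (l.foldl (fun count p =>
          if p.2 = (PySem.List.pyGet? [1, 2, 3, 4, 5] (PySem.Int.mod p.1 5)).getD 0
          then count + 1 else count) a,
       l.foldl (fun count p =>
          if p.2 = (PySem.List.pyGet? [2, 1, 2, 3, 2, 4, 2, 5] (PySem.Int.mod p.1 8)).getD 0
          then count + 1 else count) b,
       l.foldl (fun count p =>
          if p.2 = (PySem.List.pyGet? [3, 3, 1, 1, 2, 2, 4, 4, 5, 5] (PySem.Int.mod p.1 10)).getD 0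
          then count + 1 else count) c) := by
  induction l generalizing a b c with
  | nil => rfl
  | cons hd tl ih =>
      simp only [List.foldl_cons, pvStepB]
      split_ifs <;> exact ih _ _ _

theorem pvMax3 (a b c : Int) :
    (PySem.List.max? [a, b, c] (fun x => x)).getD 0 = max a (max b c) := by
  rw [show ([a, b, c] : List Int) = a :: [b, c] from rfl, PySem.List.max?_id_cons]
  simp [List.foldl, max_assoc]

-- ===== VERDICT (by name: the statement is the Claim_ definition above) =====
theorem solution_spec : Claim_equal_solution := by
  intro answers _
  show solution answers = solution_alt answers
  unfold solution solution_alt pvCountA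
  rw [pvFold_triple]
  simp only [List.map, List.length, pvMax3]
  norm_num [List.foldl]
  split_ifs <;> rfl
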